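-- pv_equiv track=rewrite | github.com/wilduk/PO164404 | zbiory.py | z5
-- ===== SOURCE A (Python) =====
-- def z5(a, b, c):
--     og = []
--     zbiory = [a, b, c]
--     for i in range(1, 26):
--         for zbior in zbiory:
--             for liczba in zbior:
--                 if i == liczba:
--                     break
--             else:
--                 og.append(i)
--     return set(og)
-- ===== SOURCE B (Python) =====
-- def z5(a, b, c):
--     common = set(a) & set(b) & set(c)
--     return set(range(1, 26)) - common
-- ===== Notes on version B (the rewrite author's own statement) =====
-- stated objective: simpler
-- what changed: Replaces the triple nested loop (25 values x 3 lists x linear membership scan with for-else) by one set intersection of the three inputs and a single set subtraction from range(1,26).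
import Mathlib
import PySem

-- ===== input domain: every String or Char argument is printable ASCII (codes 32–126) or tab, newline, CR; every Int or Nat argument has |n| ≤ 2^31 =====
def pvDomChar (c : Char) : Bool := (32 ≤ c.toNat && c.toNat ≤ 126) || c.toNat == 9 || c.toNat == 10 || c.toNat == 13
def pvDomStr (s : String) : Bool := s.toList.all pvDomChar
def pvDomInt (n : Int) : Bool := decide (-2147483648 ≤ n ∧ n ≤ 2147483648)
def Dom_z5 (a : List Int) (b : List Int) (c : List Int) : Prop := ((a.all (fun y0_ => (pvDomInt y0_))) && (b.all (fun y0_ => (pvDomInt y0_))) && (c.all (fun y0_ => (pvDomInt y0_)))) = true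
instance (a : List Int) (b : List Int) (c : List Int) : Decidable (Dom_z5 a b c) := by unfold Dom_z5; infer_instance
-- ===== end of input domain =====

-- B replaces A's triple nested loop by one set intersection and a set subtraction from range(1,26); objective: simpler.

-- ===== PORT A =====
-- the inner 'for liczba in zbior: if i == liczba: break / else: og.append(i)' is a linear membership scan
def z5 (a : List Int) (b : List Int) (c : List Int) : List Int :=
  let zbiory := [a, b, c]
  let og := (PySem.List.pyRange 1 26 1).foldl (fun og i =>
    zbiory.foldl (fun og zbior =>
      if zbior.contains i then og else og ++ [i]) og) []
  PySem.Set.ofList og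

-- ===== PORT B =====
def z5_alt (a : List Int) (b : List Int) (c : List Int) : List Int :=
  let common := PySem.Set.inter (PySem.Set.inter (PySem.Set.ofList a) (PySem.Set.ofList b)) (PySem.Set.ofList c)
  PySem.Set.diff (PySem.Set.ofList (PySem.List.pyRange 1 26 1)) common

-- ===== PRECONDITION & SPEC =====
def Spec_z5 (a : List Int) (b : List Int) (c : List Int) (out : List Int) : Prop := out = z5_alt a b c
instance (a : List Int) (b : List Int) (c : List Int) (out : List Int) : Decidable (Spec_z5 a b c out) := by unfold Spec_z5; infer_instance

-- ===== CLAIM (what is proved, stated in full; the proofs are below) =====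
def Claim_equal_z5 : Prop := ∀ (a : List Int) (b : List Int) (c : List Int), Dom_z5 a b c → Spec_z5 a b c (z5 a b c)

-- ===== LEMMAS AND PROOFS =====

-- per-i contribution of A's middle loop over the three lists
def pvBlock (a b c : List Int) (i : Int) : List Int :=
  (if a.contains i then [] else [i]) ++ (if b.contains i then [] else [i]) ++ (if c.contains i then [] else [i])

theorem pvInner (a b c : List Int) (og : List Int) (i : Int) :
    [a, b, c].foldl (fun og zbior => if zbior.contains i then og else og ++ [i]) og
      = og ++ pvBlock a b c i := by
  simp [List.foldl, pvBlock]
  split_ifs <;> simp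

theorem pvBlock_elem (a b c : List Int) (i x : Int) (hx : x ∈ pvBlock a b c i) : x = i := by
  simp [pvBlock] at hx
  rcases hx with h | h | h <;> exact h.2

theorem pvBlock_empty_iff (a b c : List Int) (i : Int) :
    pvBlock a b c i = [] ↔ (a.contains i ∧ b.contains i ∧ c.contains i) := by
  simp [pvBlock]

-- folding Set.add over a list of copies of i adds i once (or nothing)
theorem pvAdd_mem (s : PySem.Set Int) (x : Int) (h : x ∈ s) : PySem.Set.add s x = s := by
  simp [PySem.Set.add, PySem.Set.contains_eq_listContains, h]

theorem pvFoldl_add_const (i : Int) (m : List Int) (s : PySem.Set Int)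
    (h : ∀ x ∈ m, x = i) :
    m.foldl PySem.Set.add s = if m = [] then s else PySem.Set.add s i := by
  induction m generalizing s with
  | nil => simp
  | cons x m' ih =>
    have hx : x = i := h x (by simp)
    subst hx
    rw [List.foldl_cons, ih (PySem.Set.add s x) (fun y hy => h y (by simp [hy])),
        if_neg (by simp : ¬(x :: m' = []))]
    by_cases hm : m' = []
    · rw [if_pos hm]
    · rw [if_neg hm, pvAdd_mem _ _ (by simp [PySem.Set.mem_add])]

theorem pvFoldl_add_flatMap (g : Int → List Int) (l : List Int) (s : PySem.Set Int)
    (hn : l.Nodup) (hs : ∀ i ∈ l, i ∉ s)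
    (hg : ∀ i ∈ l, ∀ x ∈ g i, x = i) :
    (l.flatMap g).foldl PySem.Set.add s = s ++ l.filter (fun i => !(g i).isEmpty) := by
  induction l generalizing s with
  | nil => simp
  | cons i l' ih =>
    have h1 : (g i).foldl PySem.Set.add s = if g i = [] then s else PySem.Set.add s i :=
      pvFoldl_add_const i (g i) s (hg i (by simp))
    have hadd : PySem.Set.add s i = s ++ [i] := by
      simp [PySem.Set.add]
      intro hc
      exact absurd (by simpa [PySem.Set.contains_eq_listContains] using hc) (hs i (by simp))
    have hn' : l'.Nodup := hn.of_cons
    have hinot : i ∉ l' := by simp at hn; exact hn.1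
    simp only [List.flatMap_cons, List.foldl_append, h1]
    by_cases hge : g i = []
    · rw [if_pos hge]
      rw [ih s hn' (fun j hj => hs j (by simp [hj])) (fun j hj => hg j (by simp [hj]))]
      simp [List.filter, hge]
    · simp only [if_neg hge, hadd]
      rw [ih (s ++ [i]) hn' ?_ (fun j hj => hg j (by simp [hj]))]
      · have : (fun i => !(g i).isEmpty) i = true := by simp [hge]
        simp [this]
      · intro j hj
        simp
        exact ⟨fun hjs => hs j (by simp [hj]) hjs, fun hji => hinot (hji ▸ hj)⟩

theorem pvOfList_flatMap (g : Int → List Int) (l : List Int) (hn : l.Nodup)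
    (hg : ∀ i ∈ l, ∀ x ∈ g i, x = i) :
    PySem.Set.ofList (l.flatMap g) = l.filter (fun i => !(g i).isEmpty) := by
  rw [PySem.Set.ofList_eq_foldl]
  simpa using pvFoldl_add_flatMap g l [] hn (by simp) hg

theorem z5_spec : Claim_equal_z5 := by
  intro a b c _
  unfold Spec_z5 z5 z5_alt
  simp only []
  rw [show (fun og i => [a,b,c].foldl (fun og zbior => if zbior.contains i then og else og ++ [i]) og) = (fun og i => og ++ pvBlock a b c i) from funext fun og => funext fun i => pvInner a b c og i]
  rw [PySem.List.foldl_append_eq_flatMap]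
  rw [List.nil_append]
  rw [pvOfList_flatMap (pvBlock a b c) _ (by decide) (fun i _ => pvBlock_elem a b c i)]
  have hr : PySem.Set.ofList (PySem.List.pyRange 1 26 1) = PySem.List.pyRange 1 26 1 := by decide
  rw [hr, PySem.Set.diff]
  apply List.filter_congr
  intro i _
  show (!(pvBlock a b c i).isEmpty) = _
  rw [Bool.eq_iff_iff]
  simp only [Bool.not_eq_true', PySem.Set.contains_eq_listContains]
  rw [← not_iff_not]
  simp only [Bool.not_eq_false]
  rw [List.contains_iff_mem, ← PySem.Set.contains_iff, PySem.Set.contains_eq_listContains,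
      List.contains_iff_mem, PySem.Set.mem_inter, PySem.Set.mem_inter,
      PySem.Set.mem_ofList, PySem.Set.mem_ofList, PySem.Set.mem_ofList]
  simp [and_assoc]
  rw [pvBlock_empty_iff]
  simp
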